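-- pv_equiv track=rewrite | github.com/hyuniiya/Algorithm | 프로그래머스/0/181890. 왼쪽 오른쪽/왼쪽 오른쪽.py | solution
-- ===== SOURCE A (Python) =====
-- def solution(str_list):
--     if "l" in str_list or "r" in str_list:
--         for i, char in enumerate(str_list):
--             if char == "l":
--                 return str_list[:i]
--             elif char == "r":
--                 return str_list[i+1:]
--     return []
-- ===== SOURCE B (Python) =====
-- def solution(str_list):
--     li = str_list.index("l") if "l" in str_list else None
--     ri = str_list.index("r") if "r" in str_list else None
--     if li is not None and (ri is None or li < ri):
--         return str_list[:li]
--     elif ri is not None: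
--         return str_list[ri + 1:]
--     return []
-- ===== Notes on version B (the rewrite author's own statement) =====
-- stated objective: alternative
-- what changed: Replaces A's single early-returning enumerate scan with a locate-both-indices-then-compare decomposition using list.index.
import Mathlib
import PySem

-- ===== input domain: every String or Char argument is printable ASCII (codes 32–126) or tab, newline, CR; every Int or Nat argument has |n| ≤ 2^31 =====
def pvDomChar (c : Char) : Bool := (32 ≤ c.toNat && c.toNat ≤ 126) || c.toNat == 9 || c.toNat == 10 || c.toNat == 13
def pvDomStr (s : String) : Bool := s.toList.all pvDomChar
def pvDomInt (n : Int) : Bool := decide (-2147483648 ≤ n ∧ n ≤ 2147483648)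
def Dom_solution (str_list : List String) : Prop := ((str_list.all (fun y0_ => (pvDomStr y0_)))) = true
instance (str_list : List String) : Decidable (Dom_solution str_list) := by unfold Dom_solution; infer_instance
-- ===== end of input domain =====

-- B replaces A's single early-returning scan by locating both indices first and comparing; objective: alternative decomposition.

-- ===== PORT A =====
-- the enumerate loop: i is the current index into the full list; slices str_list[:i] /
-- str_list[i+1:] are exact as take/drop since i is a nonnegative in-range index
def solutionLoop (full : List String) (i : Nat) (rest : List String) : List String :=
  match rest with
  | [] => []
  | c :: cs =>
    if c == "l" then full.take i
    else if c == "r" then full.drop (i + 1)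
    else solutionLoop full (i + 1) cs

def solution (str_list : List String) : List String :=
  if str_list.contains "l" || str_list.contains "r" then
    solutionLoop str_list 0 str_list
  else []

-- ===== PORT B =====
def solution_alt (str_list : List String) : List String :=
  let li := PySem.List.index? str_list "l"
  let ri := PySem.List.index? str_list "r"
  match li, ri with
  | some l, some r => if l < r then str_list.take l else str_list.drop (r + 1)
  | some l, none => str_list.take l
  | none, some r => str_list.drop (r + 1)
  | none, none => []

-- ===== PRECONDITION & SPEC =====
def Spec_solution (str_list : List String) (out : List String) : Prop := out = solution_alt str_list
instance (str_list : List String) (out : List String) : Decidable (Spec_solution str_list out) := by unfold Spec_solution; infer_instance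

-- ===== CLAIM (what is proved, stated in full; the proofs are below) =====
def Claim_equal_solution : Prop := ∀ (str_list : List String), Dom_solution str_list → Spec_solution str_list (solution str_list)

-- ===== LEMMAS AND PROOFS =====

-- the loop, run on suffix `rest` starting at offset `i`, is characterised by the
-- first positions of "l"/"r" inside `rest`, shifted by `i`
theorem solutionLoop_eq (rest : List String) : ∀ (full : List String) (i : Nat),
    solutionLoop full i rest =
      match PySem.List.index? rest "l", PySem.List.index? rest "r" with
      | some l, some r => if l < r then full.take (i + l) else full.drop (i + r + 1)
      | some l, none => full.take (i + l)
      | none, some r => full.drop (i + r + 1)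
      | none, none => [] := by
  induction rest with
  | nil => intro full i; simp [solutionLoop, PySem.List.index?]
  | cons c cs ih =>
    intro full i
    by_cases hl : c = "l"
    · subst hl
      rw [PySem.List.index?_cons_self]
      have hr : PySem.List.index? ("l" :: cs) "r" =
          (PySem.List.index? cs "r").map (· + 1) :=
        PySem.List.index?_cons_of_ne cs (by decide)
      rw [hr]
      cases PySem.List.index? cs "r" <;> simp [solutionLoop]
    · by_cases hrc : c = "r"
      · subst hrc
        rw [PySem.List.index?_cons_self,
          PySem.List.index?_cons_of_ne cs (show "r" ≠ "l" by decide)]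
        cases PySem.List.index? cs "l" <;> simp [solutionLoop]
      · rw [PySem.List.index?_cons_of_ne cs hl,
          PySem.List.index?_cons_of_ne cs hrc]
        have := ih full (i + 1)
        rw [solutionLoop]
        simp only [beq_iff_eq, if_neg hl, if_neg hrc]
        rw [this]
        cases PySem.List.index? cs "l" <;> cases PySem.List.index? cs "r" <;>
          simp [Nat.add_comm, Nat.add_left_comm]

-- ===== VERDICT (by name: the statement is the Claim_ definition above) =====
theorem solution_spec : Claim_equal_solution := by
  intro str_list _
  unfold Spec_solution solution solution_alt
  by_cases h : str_list.contains "l" || str_list.contains "r"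
  · rw [if_pos h, solutionLoop_eq]
    cases hl : PySem.List.index? str_list "l" <;>
      cases hr : PySem.List.index? str_list "r" <;> simp
  · rw [if_neg h]
    simp only [Bool.or_eq_true, List.contains_eq_mem, decide_eq_true_eq, not_or] at h
    rw [(PySem.List.index?_eq_none_iff _ _).mpr h.1,
      (PySem.List.index?_eq_none_iff _ _).mpr h.2]
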